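-- pv_equiv track=rewrite | github.com/keongmini/Algorithm_Study | codility/Maximum_slice_problem3.py | solution
-- ===== SOURCE A (Python) =====
-- import collections
--
-- def solution(A):
--     q = collections.deque(A)
--
--     q.popleft()
--     q.pop()
--
--     nums = sorted(q)
--     minIdx = 0
--
--     X = 0
--     Z = len(q) - 1
--
--     sumNum = sum(q)
--
--     result = [0]
--     while X < Z:
--         minNum = nums[minIdx]
--         result.append(sumNum - minNum)
--
--         if q[X] > q[Z]:
--             tmp = q.pop()
--         else:
--             tmp = q.popleft()
--
--         sumNum -= tmp
--         nums.remove(tmp)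
--         # if tmp == minNum:
--         #     minIdx += 1
--
--         Z -= 1
--
--     return max(result)
-- ===== SOURCE B (Python) =====
-- def solution(A):
--     core = A[1:-1]
--     n = len(core)
--     order = sorted(range(n), key=lambda k: core[k])  # indices by value, built once
--     s = sum(core)
--     i, j = 0, n          # live window is core[i:j]
--     p = 0                # lazy pointer into order: entries before p are out of the window
--     best = 0
--     while j - i >= 2:
--         while not (i <= order[p] < j):
--             p += 1
--         best = max(best, s - core[order[p]])
--         if core[i] > core[j - 1]:
--             j -= 1
--             s -= core[j]
--         else:
--             s -= core[i]
--             i += 1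
--     return best
-- ===== Notes on version B (the rewrite author's own statement) =====
-- stated objective: faster
-- what changed: B replaces A's deque plus per-step maintained sorted list (O(n) remove per iteration) with two pointers into the fixed list and a sorted index order built once, consumed by a monotone lazy pointer for the running minimum, with an incrementally updated sum.
import Mathlib
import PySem

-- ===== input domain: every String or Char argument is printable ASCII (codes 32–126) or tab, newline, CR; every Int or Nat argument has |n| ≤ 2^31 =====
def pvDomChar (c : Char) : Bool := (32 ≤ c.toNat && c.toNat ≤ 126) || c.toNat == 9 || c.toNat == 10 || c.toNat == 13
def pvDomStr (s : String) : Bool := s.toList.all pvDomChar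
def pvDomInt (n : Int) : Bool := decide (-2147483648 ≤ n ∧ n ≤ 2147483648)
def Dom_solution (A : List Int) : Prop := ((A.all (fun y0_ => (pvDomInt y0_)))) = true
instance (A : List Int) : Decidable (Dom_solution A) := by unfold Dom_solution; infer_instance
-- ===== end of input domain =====

-- B replaces A's per-step sorted-list maintenance (O(n) remove each step) by a
-- sorted index order built once and a monotone lazy pointer: O(n log n) vs O(n^2).

-- ===== PORT A =====
-- the while loop of A: state (q, nums, sumNum, minIdx, X, Z, result); returns the final result list
def solAList (q nums : List Int) (sumNum minIdx X Z : Int) (result : List Int) : List Int :=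
  if _h : X < Z then
    let minNum := PySem.List.pyGetD nums minIdx 0       -- nums[minIdx]; in range while X < Z
    let result' := result ++ [sumNum - minNum]
    let cond := PySem.List.pyGetD q X 0 > PySem.List.pyGetD q Z 0   -- q[X] > q[Z]
    let tmp := if cond then PySem.List.pyGetD q (-1) 0 else PySem.List.pyGetD q 0 0
    let q' := if cond then q.dropLast else q.tail       -- q.pop() / q.popleft()
    let nums' := (PySem.List.remove? nums tmp).getD nums  -- nums.remove(tmp); tmp ∈ nums while X < Z
    solAList q' nums' (sumNum - tmp) minIdx X (Z - 1) result'
  else result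
termination_by (Z - X).toNat
decreasing_by omega

def solution (A : List Int) : Int :=
  let q0 := A.tail                                   -- q.popleft() (raises on []; excluded by Pre_)
  let q := q0.dropLast                               -- q.pop()     (raises on []; excluded by Pre_)
  let nums := PySem.List.sorted q (fun x => x) false -- sorted(q)
  let minIdx : Int := 0
  let X : Int := 0
  let Z : Int := PySem.List.len q - 1
  let sumNum := q.sum
  let result := solAList q nums sumNum minIdx X Z [0]
  (PySem.List.max? result (fun x => x)).getD 0       -- max(result); result is never []

-- ===== PORT B =====
-- the inner while of B: advance past order entries outside the window [i, j)
def skipWin (i j : Nat) : List Nat → List Nat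
  | [] => []
  | k :: rest => if i ≤ k ∧ k < j then k :: rest else skipWin i j rest

-- the outer while of B: state (order suffix from p, s, i, j, best)
def solBLoop (core : List Int) (order : List Nat) (s : Int) (i j : Nat) (best : Int) : Int :=
  if _h : i + 2 ≤ j then
    let order' := skipWin i j order
    let m := core.getD (order'.headD 0) 0            -- core[order[p]]
    let best' := max best (s - m)
    if core.getD i 0 > core.getD (j - 1) 0 then
      solBLoop core order' (s - core.getD (j - 1) 0) i (j - 1) best'
    else
      solBLoop core order' (s - core.getD i 0) (i + 1) j best'
  else best
termination_by j - i
decreasing_by all_goals omega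

def solution_alt (A : List Int) : Int :=
  let core := PySem.List.slice A (some 1) (some (-1))            -- A[1:-1]
  let n := core.length
  let order := PySem.List.sorted (List.range n) (fun k => core.getD k 0) false  -- sorted(range(n), key=core.__getitem__)
  solBLoop core order core.sum 0 n 0

-- ===== PRECONDITION & SPEC =====
-- A pops both ends of the deque unconditionally, raising IndexError on lists of length < 2.
def Pre_solution (A : List Int) : Prop := 2 ≤ A.length
instance (A : List Int) : Decidable (Pre_solution A) := by unfold Pre_solution; infer_instance
def pvWitness_solution : List Int := [3, 1, 4, 1, 5]

def Spec_solution (A : List Int) (out : Int) : Prop := out = solution_alt A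
instance (A : List Int) (out : Int) : Decidable (Spec_solution A out) := by unfold Spec_solution; infer_instance

-- ===== CLAIM (what is proved, stated in full; the proofs are below) =====
def Claim_equal_solution : Prop := ∀ (A : List Int), Dom_solution A → Pre_solution A → Spec_solution A (solution A)

-- ===== LEMMAS AND PROOFS =====

-- the current window of B: core[i:j]
def win (core : List Int) (i j : Nat) : List Int := (core.drop i).take (j - i)

-- reference recursion both ports are reduced to: running max of (sum - min) over the
-- greedy end-removal sequence, starting from `best`
def gold (w : List Int) (best : Int) : Int :=
  if _h : 2 ≤ w.length then
    let m := ((PySem.List.sorted w (fun x => x) false).headD 0)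
    let best' := max best (w.sum - m)
    if w.headD 0 > (w.getLast?).getD 0 then gold w.dropLast best' else gold w.tail best'
  else best
termination_by w.length
decreasing_by
  · simp; omega
  · simp [List.length_tail]; omega

-- the list of appended values of A's result, in order
def trace (w : List Int) : List Int :=
  if _h : 2 ≤ w.length then
    (w.sum - ((PySem.List.sorted w (fun x => x) false).headD 0)) ::
      (if w.headD 0 > (w.getLast?).getD 0 then trace w.dropLast else trace w.tail)
  else []
termination_by w.length
decreasing_by
  · simp; omega
  · simp [List.length_tail]; omega

lemma gold_eq_foldl (w : List Int) (best : Int) : gold w best = (trace w).foldl max best := by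
  fun_induction gold w best with
  | case1 w best h m best' hgt ih =>
    rw [trace, dif_pos h, if_pos hgt, List.foldl_cons]
    exact ih
  | case2 w best h m best' hgt ih =>
    rw [trace, dif_pos h, if_neg hgt, List.foldl_cons]
    exact ih
  | case3 w best h =>
    rw [trace, dif_neg h]
    rfl

-- the head of sorted(w) is the minimum of w
lemma sorted_headD_eq (w : List Int) (x : Int) (hx : x ∈ w) (hmin : ∀ y ∈ w, x ≤ y) :
    (PySem.List.sorted w (fun a => a) false).headD 0 = x := by
  rcases hsort : PySem.List.sorted w (fun a => a) false with _ | ⟨m, t⟩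
  · exact absurd ((PySem.List.mem_sorted w (fun a => a) false x).2 hx) (by simp [hsort])
  · have h1 : m ≤ x := PySem.List.key_head_sorted_le w (fun a => a) hsort x hx
    have h2 : x ≤ m := hmin m (by
      have : m ∈ PySem.List.sorted w (fun a => a) false := by simp [hsort]
      exact (PySem.List.mem_sorted w (fun a => a) false m).1 this)
    simp [le_antisymm h1 h2]

-- ----- A side -----
-- nums.remove(v) on the sorted list is sorted() of the deque with one copy of v removed
lemma sorted_erase_eq (q q' : List Int) (v : Int) (hperm : q'.Perm (q.erase v)) :
    (PySem.List.sorted q (fun x => x) false).erase v = PySem.List.sorted q' (fun x => x) false := by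
  apply List.Perm.eq_of_pairwise (le := fun a b : Int => a ≤ b)
  · exact fun a b _ _ h1 h2 => le_antisymm h1 h2
  · exact List.Pairwise.sublist List.erase_sublist
      (PySem.List.sorted_pairwise q (fun x => x))
  · exact PySem.List.sorted_pairwise q' (fun x => x)
  · exact ((PySem.List.sorted_perm q (fun x => x) false).erase v).trans
      (hperm.symm.trans (PySem.List.sorted_perm q' (fun x => x) false).symm)

lemma solAList_eq (n : Nat) : ∀ (q : List Int) (sumNum Z : Int) (r : List Int),
    q.length = n → sumNum = q.sum → Z = (q.length : Int) - 1 →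
    solAList q (PySem.List.sorted q (fun x => x) false) sumNum 0 0 Z r = r ++ trace q := by
  induction n using Nat.strong_induction_on with
  | _ n ih =>
  intro q sumNum Z r hn hs hZ
  subst hs
  rw [solAList]
  by_cases h0 : (0:Int) < Z
  · have hlen : 2 ≤ q.length := by omega
    have hne : q ≠ [] := by intro e; rw [e] at hlen; simp at hlen
    have hq0 : PySem.List.pyGetD q 0 0 = q.headD 0 := by
      rw [PySem.List.pyGetD_zero]; cases q <;> rfl
    have hqZ : PySem.List.pyGetD q Z 0 = q.getLast?.getD 0 := by
      rw [PySem.List.pyGetD_eq_getElem q 0 (by omega) (by omega),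
          List.getLast?_eq_getElem?, List.getElem?_eq_getElem (by omega)]
      simp only [Option.getD_some]
      congr 1
      omega
    have hm1 : PySem.List.pyGetD q (-1) 0 = q.getLast?.getD 0 := by
      rw [PySem.List.pyGetD_neg_one q 0 hne, List.getLast?_eq_some_getLast hne]
      rfl
    have hmin : PySem.List.pyGetD (PySem.List.sorted q (fun x => x) false) 0 0
        = (PySem.List.sorted q (fun x => x) false).headD 0 := by
      rw [PySem.List.pyGetD_zero]
      cases PySem.List.sorted q (fun x => x) false <;> rfl
    rw [dif_pos h0]
    simp only [hq0, hqZ, hm1, hmin]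
    rw [trace, dif_pos hlen]
    by_cases hgt : q.headD 0 > q.getLast?.getD 0
    · rw [if_pos hgt, if_pos hgt, if_pos hgt]
      have hv : q.getLast?.getD 0 = q.getLast hne := by
        rw [List.getLast?_eq_some_getLast hne]; rfl
      have hvm : q.getLast?.getD 0 ∈ PySem.List.sorted q (fun x => x) false := by
        rw [PySem.List.mem_sorted, hv]; exact q.getLast_mem hne
      rw [PySem.List.remove?_eq_some_erase _ _ hvm, Option.getD_some]
      have hsplit : q.dropLast ++ [q.getLast?.getD 0] = q := by
        rw [hv]; exact q.dropLast_append_getLast hne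
      have hperm : q.dropLast.Perm (q.erase (q.getLast?.getD 0)) := by
        have h1 : q.Perm (q.getLast?.getD 0 :: q.dropLast) := by
          conv_lhs => rw [← hsplit]
          exact List.perm_append_singleton _ _
        have h2 := h1.erase (q.getLast?.getD 0)
        rw [List.erase_cons_head] at h2
        exact h2.symm
      rw [sorted_erase_eq q q.dropLast _ hperm]
      have hlast : q.dropLast.length = q.length - 1 := q.length_dropLast
      rw [show r ++ (q.sum - (PySem.List.sorted q (fun x => x) false).headD 0) ::
            trace q.dropLast
          = (r ++ [q.sum - (PySem.List.sorted q (fun x => x) false).headD 0]) ++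
            trace q.dropLast by simp]
      have hsum : q.dropLast.sum = q.sum - q.getLast?.getD 0 := by
        conv_rhs => rw [← hsplit]
        simp
      exact ih (n-1) (by omega) q.dropLast _ _ _ (by omega) (by rw [hsum]) (by omega)
    · rw [if_neg hgt, if_neg hgt, if_neg hgt]
      obtain ⟨x, t, rfl⟩ : ∃ x t, q = x :: t := by
        cases q with
        | nil => exact absurd rfl hne
        | cons x t => exact ⟨x, t, rfl⟩
      have hh : (x :: t).headD 0 = x := rfl
      have hvm : (x :: t).headD 0 ∈ PySem.List.sorted (x :: t) (fun y => y) false := by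
        rw [PySem.List.mem_sorted, hh]; exact List.mem_cons_self
      rw [PySem.List.remove?_eq_some_erase _ _ hvm, Option.getD_some]
      have hperm : t.Perm ((x :: t).erase ((x :: t).headD 0)) := by
        rw [hh, List.erase_cons_head]
      rw [sorted_erase_eq (x :: t) t _ hperm]
      rw [show r ++ ((x :: t).sum - (PySem.List.sorted (x :: t) (fun y => y) false).headD 0) ::
            trace (x :: t).tail
          = (r ++ [(x :: t).sum - (PySem.List.sorted (x :: t) (fun y => y) false).headD 0]) ++
            trace (x :: t).tail by simp]
      show solAList t _ _ _ _ _ _ = _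
      exact ih (n-1) (by simp at hn; omega) t _ _ _ (by simp at hn; omega)
        (by simp) (by simp at hZ ⊢; omega)
  · rw [dif_neg h0, trace, dif_neg (by omega)]
    simp

lemma max?_id_cons (tr : List Int) (a : Int) :
    PySem.List.max? (a :: tr) (fun x => x) = some (tr.foldl max a) := by
  induction tr generalizing a with
  | nil => rfl
  | cons x tr ih =>
    have h1 : PySem.List.max? (a :: x :: tr) (fun y : Int => y)
        = PySem.List.max? (max a x :: tr) (fun y : Int => y) := by
      show List.foldl _ (if a < x then some x else some a) tr
          = List.foldl _ (some (max a x)) tr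
      congr 1
      rcases le_or_gt x a with h | h
      · rw [if_neg (not_lt.2 h), max_eq_left h]
      · rw [if_pos h, max_eq_right h.le]
    rw [h1, ih, List.foldl_cons]

lemma solution_eq_gold (A : List Int) (_h : 2 ≤ A.length) :
    solution A = gold A.tail.dropLast 0 := by
  simp only [solution]
  rw [solAList_eq A.tail.dropLast.length A.tail.dropLast _ _ _ rfl rfl
      (by rw [PySem.List.len_eq])]
  rw [show ([0] ++ trace A.tail.dropLast : List Int) = 0 :: trace A.tail.dropLast from rfl]
  rw [max?_id_cons, Option.getD_some, ← gold_eq_foldl]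

-- ----- B side -----
lemma skipWin_split (i j : Nat) (order : List Nat) :
    ∃ pre, order = pre ++ skipWin i j order ∧ ∀ k ∈ pre, ¬(i ≤ k ∧ k < j) := by
  induction order with
  | nil => exact ⟨[], rfl, by simp⟩
  | cons k rest ih =>
    by_cases hk : i ≤ k ∧ k < j
    · exact ⟨[], by simp [skipWin, hk], by simp⟩
    · obtain ⟨pre, hpre, hout⟩ := ih
      exact ⟨k :: pre, by simp [skipWin, hk]; exact hpre, by
        intro k' hk'
        rcases List.mem_cons.1 hk' with rfl | h
        · exact hk
        · exact hout k' h⟩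

lemma win_length (core : List Int) (i j : Nat) (hj : j ≤ core.length) :
    (win core i j).length = j - i := by
  simp [win]; omega

lemma win_getElem? (core : List Int) (i j t : Nat) (ht : t < j - i) :
    (win core i j)[t]? = core[i + t]? := by
  simp only [win]
  rw [List.getElem?_take_of_lt ht, List.getElem?_drop]

lemma win_headD (core : List Int) (i j : Nat) (hij : i < j) (_hj : j ≤ core.length) :
    (win core i j).headD 0 = core.getD i 0 := by
  rw [List.headD_eq_head?_getD, List.head?_eq_getElem?, win_getElem? core i j 0 (by omega),
      List.getD_eq_getElem?_getD]
  simp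

lemma win_getLastD (core : List Int) (i j : Nat) (hij : i < j) (hj : j ≤ core.length) :
    (win core i j).getLast?.getD 0 = core.getD (j - 1) 0 := by
  rw [List.getLast?_eq_getElem?, win_length core i j hj,
      win_getElem? core i j (j - i - 1) (by omega), List.getD_eq_getElem?_getD]
  congr 2
  omega

lemma win_tail (core : List Int) (i j : Nat) :
    (win core i j).tail = win core (i + 1) j := by
  simp only [win, ← List.drop_one, List.drop_take, List.drop_drop]
  congr 1

lemma win_dropLast (core : List Int) (i j : Nat) (hij : i < j) (hj : j ≤ core.length) :
    (win core i j).dropLast = win core i (j - 1) := by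
  rw [List.dropLast_eq_take, win_length core i j hj]
  simp only [win, List.take_take]
  congr 1
  omega

lemma win_mem (core : List Int) (i j : Nat) (hj : j ≤ core.length) (x : Int) :
    x ∈ win core i j ↔ ∃ k, i ≤ k ∧ k < j ∧ core.getD k 0 = x := by
  rw [List.mem_iff_getElem?]
  constructor
  · rintro ⟨t, ht⟩
    obtain ⟨h1, _⟩ := List.getElem?_eq_some_iff.1 ht
    rw [win_length core i j hj] at h1
    refine ⟨i + t, by omega, by omega, ?_⟩
    rw [List.getD_eq_getElem?_getD, ← win_getElem? core i j t h1, ht]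
    rfl
  · rintro ⟨k, h1, h2, h3⟩
    refine ⟨k - i, ?_⟩
    rw [win_getElem? core i j (k - i) (by omega), show i + (k - i) = k by omega, ← h3,
        List.getD_eq_getElem?_getD, List.getElem?_eq_getElem (show k < core.length by omega)]
    rfl

lemma sum_head_tail (l : List Int) (h : l ≠ []) : l.sum = l.headD 0 + l.tail.sum := by
  cases l with
  | nil => exact absurd rfl h
  | cons x t => simp

lemma sum_dropLast (l : List Int) (h : l ≠ []) :
    l.sum = l.dropLast.sum + l.getLast?.getD 0 := by
  conv_lhs => rw [← List.dropLast_append_getLast h]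
  rw [List.getLast?_eq_some_getLast h]
  simp

lemma skipWin_cons_window (i j : Nat) (order : List Nat) (h0 : Nat) (rest : List Nat)
    (h : skipWin i j order = h0 :: rest) : i ≤ h0 ∧ h0 < j := by
  induction order with
  | nil => simp [skipWin] at h
  | cons k r ih =>
    by_cases hk : i ≤ k ∧ k < j
    · rw [skipWin, if_pos hk] at h
      cases h
      exact hk
    · rw [skipWin, if_neg hk] at h
      exact ih h

lemma skipWin_sublist (i j : Nat) (order : List Nat) : (skipWin i j order).Sublist order := by
  obtain ⟨pre, hpre, _⟩ := skipWin_split i j order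
  conv_rhs => rw [hpre]
  exact List.sublist_append_right pre _

-- the head of the lazily-skipped order is the minimum of the current window
lemma skip_head_min (core : List Int) (order : List Nat) (i j : Nat)
    (h2 : i + 2 ≤ j) (hj : j ≤ core.length)
    (hb : order.Pairwise (fun a b => core.getD a 0 ≤ core.getD b 0))
    (hc : ∀ k, i ≤ k → k < j → k ∈ order) :
    core.getD ((skipWin i j order).headD 0) 0
      = (PySem.List.sorted (win core i j) (fun x => x) false).headD 0 ∧
    (∀ k, i ≤ k → k < j → k ∈ skipWin i j order) := by
  obtain ⟨pre, hpre, hout⟩ := skipWin_split i j order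
  have hmem : ∀ k, i ≤ k → k < j → k ∈ skipWin i j order := by
    intro k hk1 hk2
    have hk := hc k hk1 hk2
    rw [hpre] at hk
    rcases List.mem_append.1 hk with h | h
    · exact absurd ⟨hk1, hk2⟩ (hout k h)
    · exact h
  refine ⟨?_, hmem⟩
  have hi : i ∈ skipWin i j order := hmem i le_rfl (by omega)
  obtain ⟨h0, rest, hcons⟩ : ∃ h0 rest, skipWin i j order = h0 :: rest := by
    cases hsk : skipWin i j order with
    | nil => rw [hsk] at hi; simp at hi
    | cons a b => exact ⟨a, b, rfl⟩
  obtain ⟨hw1, hw2⟩ := skipWin_cons_window i j order h0 rest hcons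
  have hbs : (skipWin i j order).Pairwise (fun a b => core.getD a 0 ≤ core.getD b 0) :=
    hb.sublist (skipWin_sublist i j order)
  rw [hcons] at hbs
  have hble := (List.pairwise_cons.1 hbs).1
  rw [hcons]
  refine (sorted_headD_eq (win core i j) (core.getD h0 0) ?_ ?_).symm
  · exact (win_mem core i j hj _).2 ⟨h0, hw1, hw2, rfl⟩
  · intro y hy
    obtain ⟨k, hk1, hk2, rfl⟩ := (win_mem core i j hj y).1 hy
    have := hmem k hk1 hk2
    rw [hcons] at this
    rcases List.mem_cons.1 this with rfl | h
    · exact le_rfl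
    · exact hble k h

lemma solBLoop_eq (core : List Int) (order : List Nat) (s : Int) (i j : Nat) (best : Int) :
    j ≤ core.length →
    order.Pairwise (fun a b => core.getD a 0 ≤ core.getD b 0) →
    (∀ k, i ≤ k → k < j → k ∈ order) →
    s = (win core i j).sum →
    solBLoop core order s i j best = gold (win core i j) best := by
  fun_induction solBLoop core order s i j best with
  | case1 order s i j best h2 o' m b' hgt ih =>
    intro hj hb hc hs
    have hkey := skip_head_min core order i j h2 hj hb hc
    have hwne : win core i j ≠ [] := by
      have hl := win_length core i j hj
      intro e
      rw [e] at hl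
      simp at hl
      omega
    rw [gold, dif_pos (by rw [win_length core i j hj]; omega)]
    rw [win_headD core i j (by omega) hj, win_getLastD core i j (by omega) hj, if_pos hgt,
        win_dropLast core i j (by omega) hj, ← hkey.1, ← hs]
    exact ih (by omega) (hb.sublist (skipWin_sublist i j order))
      (fun k hk1 hk2 => hkey.2 k hk1 (by omega))
      (by rw [hs, sum_dropLast (win core i j) hwne, win_dropLast core i j (by omega) hj,
              win_getLastD core i j (by omega) hj]; ring)
  | case2 order s i j best h2 o' m b' hgt ih =>
    intro hj hb hc hs
    have hkey := skip_head_min core order i j h2 hj hb hc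
    have hwne : win core i j ≠ [] := by
      have hl := win_length core i j hj
      intro e
      rw [e] at hl
      simp at hl
      omega
    rw [gold, dif_pos (by rw [win_length core i j hj]; omega)]
    rw [win_headD core i j (by omega) hj, win_getLastD core i j (by omega) hj, if_neg hgt,
        win_tail core i j, ← hkey.1, ← hs]
    exact ih hj (hb.sublist (skipWin_sublist i j order))
      (fun k hk1 hk2 => hkey.2 k (by omega) hk2)
      (by rw [hs, sum_head_tail (win core i j) hwne, win_tail core i j,
              win_headD core i j (by omega) hj]; ring)
  | case3 order s i j best h2 =>
    intro hj _ _ _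
    rw [gold, dif_neg (by rw [win_length core i j hj]; omega)]

lemma slice_one_neg_one (A : List Int) : PySem.List.slice A (some 1) (some (-1)) = A.tail.dropLast := by
  show List.take (PySem.List.clampIdx A.length (-1) - PySem.List.clampIdx A.length 1)
      (List.drop (PySem.List.clampIdx A.length 1) A) = _
  have hc1 : PySem.List.clampIdx A.length 1 = min 1 A.length := by
    exact_mod_cast PySem.List.clampIdx_natCast A.length 1
  rw [PySem.List.clampIdx_neg_one, hc1, List.dropLast_eq_take, ← List.drop_one]
  rw [List.length_drop]
  rcases A with _ | ⟨x, t⟩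
  · simp
  · simp only [List.length_cons, Nat.min_def]
    congr 1

lemma solution_alt_eq_gold (A : List Int) (_h : 2 ≤ A.length) :
    solution_alt A = gold A.tail.dropLast 0 := by
  simp only [solution_alt, slice_one_neg_one]
  rw [solBLoop_eq A.tail.dropLast _ _ 0 A.tail.dropLast.length 0 le_rfl
      (PySem.List.sorted_pairwise _ _)
      (fun k _ hk2 => by rw [PySem.List.mem_sorted]; exact List.mem_range.2 hk2)
      (by simp only [win, Nat.sub_zero, List.drop_zero, List.take_length])]
  congr 1
  simp only [win, Nat.sub_zero, List.drop_zero, List.take_length]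

-- ===== VERDICT (by name: the statement is the Claim_ definition above) =====
theorem solution_spec : Claim_equal_solution := by
  intro A _ hpre
  unfold Spec_solution
  rw [solution_eq_gold A hpre, solution_alt_eq_gold A hpre]
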